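-- pv_equiv track=rewrite | github.com/qingfengforum-fork/asn1tools | asn1tools/parser.py | convert_enum_values
-- ===== SOURCE A (Python) =====
-- def convert_enum_values(tokens):
--     number = 0
--     values = {}
--
--     for token in tokens:
--         if len(token) == 2:
--             number = int(token[1])
--
--         values[number] = token[0]
--         number += 1
--
--     return values
-- ===== SOURCE B (Python) =====
-- def convert_enum_values(tokens):
--     # Segment decomposition: each explicit-value token starts a segment; the
--     # segment's entries are numbered base+offset arithmetically (no running counter).
--     values = {}
--     i = 0
--     n = len(tokens)
--     while i < n:
--         head = tokens[i]
--         base = int(head[1]) if len(head) == 2 else 0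
--         names = [head[0]]
--         i += 1
--         while i < n and len(tokens[i]) != 2:
--             names.append(tokens[i][0])
--             i += 1
--         for offset, name in enumerate(names):
--             values[base + offset] = name
--     return values
-- ===== Notes on version B (the rewrite author's own statement) =====
-- stated objective: alternative
-- what changed: Replaces A's single stateful loop with a running counter by a segment decomposition: the token list is cut into runs headed by an explicit-value token, and each run's numbers are produced arithmetically as base+offset via enumerate, so no counter is threaded through the traversal.
import Mathlib
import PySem

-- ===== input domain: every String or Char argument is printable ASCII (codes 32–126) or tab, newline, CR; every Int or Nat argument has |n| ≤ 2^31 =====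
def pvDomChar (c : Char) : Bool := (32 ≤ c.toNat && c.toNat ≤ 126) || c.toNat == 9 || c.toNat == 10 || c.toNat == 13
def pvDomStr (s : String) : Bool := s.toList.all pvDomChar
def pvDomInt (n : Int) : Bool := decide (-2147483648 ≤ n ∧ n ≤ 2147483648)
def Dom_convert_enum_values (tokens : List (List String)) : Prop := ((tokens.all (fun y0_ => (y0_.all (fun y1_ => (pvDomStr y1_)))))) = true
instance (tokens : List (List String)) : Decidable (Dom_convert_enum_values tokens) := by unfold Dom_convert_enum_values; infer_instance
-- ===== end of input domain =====

-- B replaces A's counter-threading loop by a segment decomposition (runs headed by an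
-- explicit-value token, numbered arithmetically base+offset) — alternative structure, same cost.


-- ===== PORT A =====
def pvLoopA (number : Int) (values : PySem.Dict Int String) :
    List (List String) → PySem.Dict Int String
  | [] => values
  | token :: ts =>
      let n : Int := if token.length == 2
        then (PySem.Int.ofStr? (PySem.List.pyGetD token 1 "")).getD 0
        else number
      pvLoopA (n + 1) (values.insert n (PySem.List.pyGetD token 0 "")) ts

def convert_enum_values (tokens : List (List String)) : List (Int × String) :=
  (pvLoopA 0 PySem.Dict.empty tokens).items

-- ===== PORT B =====
-- inner while: names of the leading run of implicit tokens, and the remainder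
def pvSeg : List (List String) → List String × List (List String)
  | [] => ([], [])
  | t :: ts =>
      if t.length == 2 then ([], t :: ts)
      else
        let p := pvSeg ts
        (PySem.List.pyGetD t 0 "" :: p.1, p.2)

theorem pvSeg_len_le : ∀ (ts : List (List String)), (pvSeg ts).2.length ≤ ts.length := by
  intro ts
  induction ts with
  | nil => simp [pvSeg]
  | cons t ts ih =>
      simp only [pvSeg]
      split
      · simp
      · simpa using Nat.le_succ_of_le ih

-- outer while: one segment per step, numbered base+offset via enumerate
def pvOuterB : List (List String) → PySem.Dict Int String → PySem.Dict Int String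
  | [], d => d
  | head :: ts, d =>
      let base : Int := if head.length == 2
        then (PySem.Int.ofStr? (PySem.List.pyGetD head 1 "")).getD 0
        else 0
      let p := pvSeg ts
      let names := PySem.List.pyGetD head 0 "" :: p.1
      pvOuterB p.2
        ((PySem.List.enumerate names 0).foldl (fun d q => d.insert (base + q.1) q.2) d)
  termination_by ts _ => ts.length
  decreasing_by
    exact Nat.lt_succ_of_le (pvSeg_len_le ts)

def convert_enum_values_alt (tokens : List (List String)) : List (Int × String) :=
  (pvOuterB tokens PySem.Dict.empty).items

-- ===== PRECONDITION & SPEC =====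
-- Pre_ excludes exactly the inputs where Python A raises: an empty token (IndexError on
-- token[0]) or a 2-element token whose second entry is not int()-parseable (ValueError).
def Pre_convert_enum_values (tokens : List (List String)) : Prop :=
  ∀ t ∈ tokens, t ≠ [] ∧ (t.length = 2 → (PySem.Int.ofStr? (t.getD 1 "")).isSome = true)
instance (tokens : List (List String)) : Decidable (Pre_convert_enum_values tokens) := by
  unfold Pre_convert_enum_values; infer_instance

def pvWitness_convert_enum_values : List (List String) :=
  [["a"], ["b", "5"], ["c"]]

def Spec_convert_enum_values (tokens : List (List String)) (out : List (Int × String)) : Prop :=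
  out = convert_enum_values_alt tokens
instance (tokens : List (List String)) (out : List (Int × String)) :
    Decidable (Spec_convert_enum_values tokens out) := by
  unfold Spec_convert_enum_values; infer_instance

-- ===== CLAIM =====
def Claim_equal_convert_enum_values : Prop :=
  ∀ (tokens : List (List String)), Dom_convert_enum_values tokens →
    Pre_convert_enum_values tokens →
    Spec_convert_enum_values tokens (convert_enum_values tokens)

-- ===== LEMMAS AND PROOFS =====
-- straight fill: insert b, b+1, … (what the enumerate fold amounts to)
def pvFill (b : Int) : List String → PySem.Dict Int String → PySem.Dict Int String
  | [], d => d
  | name :: ns, d => pvFill (b + 1) ns (d.insert b name)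

theorem fill_shift : ∀ (ns : List String) (b s : Int) (d : PySem.Dict Int String),
    (PySem.List.enumerate ns s).foldl (fun d q => d.insert (b + q.1) q.2) d
      = pvFill (b + s) ns d := by
  intro ns
  induction ns with
  | nil => intro b s d; simp [pvFill, PySem.List.enumerate_nil]
  | cons x ns ih =>
      intro b s d
      simp only [PySem.List.enumerate_cons, List.foldl, pvFill]
      rw [ih b (s + 1)]
      ring_nf

-- A's loop over a list = A's loop over the remainder of the leading implicit run,
-- after filling that run with numbers b, b+1, …
theorem runA : ∀ (ts : List (List String)) (b : Int) (d : PySem.Dict Int String),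
    pvLoopA b d ts
      = pvLoopA (b + ((pvSeg ts).1.length : Int)) (pvFill b (pvSeg ts).1 d) (pvSeg ts).2 := by
  intro ts
  induction ts with
  | nil => intro b d; simp [pvSeg, pvFill]
  | cons t ts ih =>
      intro b d
      by_cases h : t.length = 2
      · simp [pvSeg, pvLoopA, pvFill, h]
      · have hb : (t.length == 2) = false := by simp [h]
        simp only [pvSeg, hb, Bool.false_eq_true, if_false, pvLoopA, pvFill,
          List.length_cons]
        rw [ih (b + 1) (d.insert b (PySem.List.pyGetD t 0 ""))]
        have : b + (((pvSeg ts).1.length + 1 : Nat) : Int)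
            = b + 1 + ((pvSeg ts).1.length : Int) := by push_cast; ring
        rw [this]

-- the remainder left by pvSeg is empty or starts with an explicit token
theorem pvSeg_rest : ∀ (ts : List (List String)),
    (pvSeg ts).2 = [] ∨ ∃ h tl, (pvSeg ts).2 = h :: tl ∧ h.length = 2 := by
  intro ts
  induction ts with
  | nil => left; rfl
  | cons t ts ih =>
      by_cases h : t.length = 2
      · right; exact ⟨t, ts, by simp [pvSeg, h], h⟩
      · simpa [pvSeg, h] using ih

-- main correspondence: A's loop = B's segment loop whenever the list is empty,
-- starts explicit, or the counter is 0 (the initial state)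
theorem keyAB : ∀ (n : Nat) (ts : List (List String)), ts.length = n →
    ∀ (num : Int) (d : PySem.Dict Int String),
    (match ts with
     | [] => True
     | t :: _ => t.length = 2 ∨ num = 0) →
    pvLoopA num d ts = pvOuterB ts d := by
  intro n
  induction n using Nat.strong_induction_on with
  | _ n IH =>
  intro ts hlen num d hcond
  match ts, hcond with
  | [], _ => simp [pvLoopA, pvOuterB]
  | head :: rest, hcond =>
      have hbase : (if (head.length == 2) = true
            then (PySem.Int.ofStr? (PySem.List.pyGetD head 1 "")).getD 0
            else num)
          = (if (head.length == 2) = true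
            then (PySem.Int.ofStr? (PySem.List.pyGetD head 1 "")).getD 0
            else 0) := by
        by_cases h : head.length = 2
        · simp [h]
        · rcases hcond with h2 | h0
          · exact absurd h2 h
          · simp [h, h0]
      set base : Int := (if (head.length == 2) = true
            then (PySem.Int.ofStr? (PySem.List.pyGetD head 1 "")).getD 0
            else 0) with hbasedef
      simp only [pvLoopA, hbase, pvOuterB]
      rw [fill_shift, add_zero]
      simp only [pvFill]
      rw [runA rest (base + 1) (d.insert base (PySem.List.pyGetD head 0 ""))]
      rcases pvSeg_rest rest with hre | ⟨h2, tl, hre, hlen2⟩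
      · rw [hre]
        by_cases h : head.length = 2 <;> simp [pvLoopA, pvOuterB, hbasedef, h]
      · have hlt : (pvSeg rest).2.length < n := by
          subst hlen
          exact Nat.lt_succ_of_le (pvSeg_len_le rest)
        exact IH _ hlt (pvSeg rest).2 rfl
          (base + 1 + ((pvSeg rest).1.length : Int))
          (pvFill (base + 1) (pvSeg rest).1 (d.insert base (PySem.List.pyGetD head 0 "")))
          (by rw [hre]; exact Or.inl hlen2)

-- ===== VERDICT =====
theorem convert_enum_values_spec : Claim_equal_convert_enum_values := by
  intro tokens _ _
  unfold Spec_convert_enum_values convert_enum_values convert_enum_values_alt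
  rw [keyAB tokens.length tokens rfl 0 PySem.Dict.empty (by cases tokens <;> simp)]
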